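-- pv_equiv track=rewrite | github.com/vishwajeetsudhanshu/Python-Code | Recursion/poweroff4.py | check
-- ===== SOURCE A (Python) =====
-- def check (n):
--     if n==1:
--         return True
--     if n==0:
--         return False
--     if n%4!=0:
--         return False
--
--     return check(n//4)
-- ===== SOURCE B (Python) =====
-- def check(n):
--     # power-of-4 test via the classic bit trick: a positive power of two
--     # (n & (n-1) == 0) whose residue mod 3 is 1 is exactly a power of 4.
--     return n >= 1 and n & (n - 1) == 0 and n % 3 == 1
-- ===== Notes on version B (the rewrite author's own statement) =====
-- stated objective: alternative
-- what changed: Replaced the recursive repeated-division-by-four test with a single constant-time bitwise check: positive, a power of two via n&(n-1)==0, and residue one modulo three.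
import Mathlib
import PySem

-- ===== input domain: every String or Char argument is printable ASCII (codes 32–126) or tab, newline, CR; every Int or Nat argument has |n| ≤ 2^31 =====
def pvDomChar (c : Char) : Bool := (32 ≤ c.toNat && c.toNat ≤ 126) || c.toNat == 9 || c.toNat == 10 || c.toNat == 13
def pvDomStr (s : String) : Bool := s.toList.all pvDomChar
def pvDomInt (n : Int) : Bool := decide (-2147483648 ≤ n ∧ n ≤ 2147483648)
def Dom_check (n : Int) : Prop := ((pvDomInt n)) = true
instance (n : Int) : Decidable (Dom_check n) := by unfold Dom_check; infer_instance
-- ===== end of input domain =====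

-- B replaces A's repeated-division-by-4 recursion by a single bitwise check
-- (positive, n & (n-1) == 0, n % 3 == 1): a positive power of two with residue 1 mod 3 is a power of 4.


-- lemma cited by the port's decreasing_by (must precede the port)
theorem floordiv_four_natAbs_lt (n : Int) (h1 : n ≠ 1) (h0 : n ≠ 0)
    (hd : PySem.Int.mod n 4 = 0) : (PySem.Int.floordiv n 4).natAbs < n.natAbs := by
  obtain ⟨m, rfl⟩ := (PySem.Int.mod_eq_zero_iff_dvd n 4).mp hd
  have he : PySem.Int.floordiv (4 * m) 4 = m := by
    rw [PySem.Int.floordiv_eq_iff_of_pos (by norm_num)]; omega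
  rw [he]; omega

-- ===== PORT A =====
def check (n : Int) : Bool :=
  if n = 1 then true
  else if n = 0 then false
  else if PySem.Int.mod n 4 ≠ 0 then false
  else check (PySem.Int.floordiv n 4)
termination_by n.natAbs
decreasing_by
  exact floordiv_four_natAbs_lt n (by assumption) (by assumption) (by omega)

-- ===== PORT B =====
def check_alt (n : Int) : Bool :=
  decide (n ≥ 1) && (PySem.Int.band n (n - 1) == 0) && (PySem.Int.mod n 3 == 1)

-- ===== PRECONDITION & SPEC =====
def Spec_check (n : Int) (out : Bool) : Prop := out = check_alt n
instance (n : Int) (out : Bool) : Decidable (Spec_check n out) := by unfold Spec_check; infer_instance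

-- ===== CLAIM (what is proved, stated in full; the proofs are below) =====
def Claim_equal_check : Prop := ∀ (n : Int), Dom_check n → Spec_check n (check n)

-- ===== LEMMAS AND PROOFS =====

theorem natAnd_odd_even (k : Nat) : (2*k+1) &&& (2*k) = 2*k := by
  apply Nat.eq_of_testBit_eq
  intro j
  rw [Nat.testBit_and]
  cases j with
  | zero => simp [Nat.testBit_zero]
  | succ j =>
    have h1 : (2*k+1)/2 = k := by omega
    have h2 : (2*k)/2 = k := by omega
    simp only [Nat.testBit_add_one, h1, h2, Bool.and_self]

theorem natAnd_four (a : Nat) : (4*a) &&& (4*a-1) = 4*(a &&& (a-1)) := by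
  apply Nat.eq_of_testBit_eq
  intro j
  rw [Nat.testBit_and]
  match j with
  | 0 =>
    have h1 : (4*a) % 2 = 0 := by omega
    have h2 : (4*(a &&& (a-1))) % 2 = 0 := by omega
    simp [Nat.testBit_zero, h1, h2]
  | 1 =>
    have h1 : (4*a)/2 = 2*a := by omega
    have h2 : (4*(a &&& (a-1)))/2 = 2*(a &&& (a-1)) := by omega
    have h3 : (2*a) % 2 = 0 := by omega
    have h4 : (2*(a &&& (a-1))) % 2 = 0 := by omega
    simp only [Nat.testBit_add_one, h1, h2]
    simp [Nat.testBit_zero, h3, h4]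
  | (j+2) =>
    have h1 : (4*a)/2/2 = a := by omega
    have h2 : (4*a-1)/2/2 = a-1 := by omega
    have h3 : (4*(a &&& (a-1)))/2/2 = a &&& (a-1) := by omega
    simp only [Nat.testBit_add_one, h1, h2, h3, Nat.testBit_and]

theorem natAnd_two_mod (q : Nat) : (4*q+2) &&& (4*q+1) = 4*q := by
  apply Nat.eq_of_testBit_eq
  intro j
  rw [Nat.testBit_and]
  match j with
  | 0 =>
    have h1 : (4*q+2) % 2 = 0 := by omega
    have h2 : (4*q) % 2 = 0 := by omega
    simp [Nat.testBit_zero, h1, h2]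
  | 1 =>
    have h1 : (4*q+2)/2 = 2*q+1 := by omega
    have h2 : (4*q+1)/2 = 2*q := by omega
    have h3 : (4*q)/2 = 2*q := by omega
    simp only [Nat.testBit_add_one, h1, h2, h3]
    have h4 : (2*q+1) % 2 = 1 := by omega
    have h5 : (2*q) % 2 = 0 := by omega
    simp [Nat.testBit_zero, h4, h5]
  | (j+2) =>
    have h1 : (4*q+2)/2/2 = q := by omega
    have h2 : (4*q+1)/2/2 = q := by omega
    have h3 : (4*q)/2/2 = q := by omega
    simp only [Nat.testBit_add_one, h1, h2, h3, Bool.and_self]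

-- check_alt on nonpositive inputs
theorem alt_nonpos (n : Int) (h : n ≤ 0) : check_alt n = false := by
  unfold check_alt
  have : decide (n ≥ 1) = false := by simp; omega
  simp [this]

-- band of a positive int with its predecessor, seen on the Nat side
theorem band_pred_toNat (n : Int) (h : 1 ≤ n) :
    PySem.Int.band n (n - 1) = ((n.toNat &&& (n.toNat - 1) : Nat) : Int) := by
  rw [PySem.Int.band_of_nonneg (by omega) (by omega)]
  have h2 : (n - 1).toNat = n.toNat - 1 := by omega
  rw [h2]

-- check_alt is invariant under stripping one factor 4 (positive case)
theorem alt_step (m : Int) (hm : 1 ≤ m) : check_alt (4 * m) = check_alt m := by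
  unfold check_alt
  have e1 : decide ((4:Int) * m ≥ 1) = decide (m ≥ 1) := by simp; omega
  have e2 : PySem.Int.mod (4 * m) 3 = PySem.Int.mod m 3 := by
    rw [PySem.Int.mod_eq_emod_of_pos (by norm_num), PySem.Int.mod_eq_emod_of_pos (by norm_num)]
    omega
  have e3 : (PySem.Int.band (4 * m) (4 * m - 1) == 0) = (PySem.Int.band m (m - 1) == 0) := by
    rw [band_pred_toNat _ (by omega), band_pred_toNat _ hm]
    have ht : (4 * m).toNat = 4 * m.toNat := by omega
    rw [ht, natAnd_four]
    simp
  rw [e1, e2, e3]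

-- check_alt is false on n ≥ 2 not divisible by 4
theorem alt_not_div4 (n : Int) (h2 : 2 ≤ n) (hmod : PySem.Int.mod n 4 ≠ 0) :
    check_alt n = false := by
  have hm : PySem.Int.mod n 4 = n % 4 := PySem.Int.mod_eq_emod_of_pos (by norm_num)
  by_cases hodd : n % 2 = 1
  · -- n odd, n ≥ 3 : n & (n-1) = n - 1 ≠ 0
    unfold check_alt
    have hb := band_pred_toNat n (by omega)
    set a := n.toNat with ha
    have h3 : 3 ≤ a := by omega
    have hk : a = 2 * (a / 2) + 1 := by omega
    have : a &&& (a - 1) = 2 * (a / 2) := by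
      calc a &&& (a - 1) = (2 * (a/2) + 1) &&& (2 * (a/2)) := by rw [← hk]; congr 1; omega
        _ = 2 * (a/2) := natAnd_odd_even _
    have hne : (PySem.Int.band n (n - 1) == 0) = false := by
      rw [hb, this]
      simp
      omega
    simp [hne]
  · -- n ≡ 2 (mod 4)
    have h2m : n % 4 = 2 := by omega
    by_cases hq : n = 2
    · subst hq; decide
    · unfold check_alt
      have hb := band_pred_toNat n (by omega)
      set a := n.toNat with ha
      have hk : a = 4 * (a / 4) + 2 := by omega
      have hq1 : 1 ≤ a / 4 := by omega
      have : a &&& (a - 1) = 4 * (a / 4) := by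
        calc a &&& (a - 1) = (4 * (a/4) + 2) &&& (4 * (a/4) + 1) := by rw [← hk]; congr 1; omega
          _ = 4 * (a/4) := natAnd_two_mod _
      have hne : (PySem.Int.band n (n - 1) == 0) = false := by
        rw [hb, this]
        simp
        omega
      simp [hne]

theorem check_eq_alt : ∀ (N : Nat) (n : Int), n.natAbs ≤ N → check n = check_alt n := by
  intro N
  induction N with
  | zero =>
    intro n h
    have : n = 0 := by omega
    subst this
    rw [check]
    decide
  | succ N ih =>
    intro n hn
    rw [check]
    by_cases h1 : n = 1
    · subst h1; simp; decide
    by_cases h0 : n = 0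
    · subst h0; simp; decide
    simp only [if_neg h1, if_neg h0]
    by_cases hmod : PySem.Int.mod n 4 ≠ 0
    · simp only [if_pos hmod]
      by_cases hneg : n ≤ 0
      · rw [alt_nonpos n hneg]
      · exact (alt_not_div4 n (by omega) hmod).symm
    · simp only [if_neg hmod]
      simp only [not_not] at hmod
      obtain ⟨m, rfl⟩ := (PySem.Int.mod_eq_zero_iff_dvd n 4).mp hmod
      have he : PySem.Int.floordiv (4 * m) 4 = m := by
        rw [PySem.Int.floordiv_eq_iff_of_pos (by norm_num)]; omega
      rw [he]
      have hm0 : m ≠ 0 := by intro h; subst h; simp at h0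
      have hrec := ih m (by omega)
      rw [hrec]
      by_cases hmp : 1 ≤ m
      · exact (alt_step m hmp).symm
      · rw [alt_nonpos m (by omega), alt_nonpos (4 * m) (by omega)]

-- ===== VERDICT (by name: the statement is the Claim_ definition above) =====
theorem check_spec : Claim_equal_check := by
  intro n _
  unfold Spec_check
  exact check_eq_alt n.natAbs n le_rfl
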